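-- pv_equiv track=rewrite | github.com/boxwrench/paramAItric | fusion_addin/ops/live_ops.py | _normalize_plane_name
-- ===== SOURCE A (Python) =====
-- from typing import Any, Protocol
--
-- def _normalize_plane_name(plane_name: Any) -> str:
--     if not isinstance(plane_name, str):
--         return "unknown"
--     normalized = "".join(character.lower() for character in plane_name if character.isalpha())
--     plane_aliases = {
--         "xy": "xy",
--         "xyplane": "xy",
--         "xysketchplane": "xy",
--         "xz": "xz",
--         "xzplane": "xz",
--         "xzsketchplane": "xz",
--         "yz": "yz",
--         "yzplane": "yz",
--         "yzsketchplane": "yz",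
--     }
--     return plane_aliases.get(normalized, "unknown")
-- ===== SOURCE B (Python) =====
-- def _normalize_plane_name(plane_name):
--     if not isinstance(plane_name, str):
--         return "unknown"
--     base = "".join(c.lower() for c in plane_name if c.isalpha())
--     for suffix in ("sketchplane", "plane"):
--         if base.endswith(suffix):
--             base = base[:-len(suffix)]
--             break
--     return base if base in ("xy", "xz", "yz") else "unknown"
-- ===== Notes on version B (the rewrite author's own statement) =====
-- stated objective: simpler
-- what changed: Replaces A's 9-entry alias dictionary with stripping one trailing 'sketchplane'/'plane' suffix (in that order) from the normalized string and checking the remaining base against {'xy','xz','yz'}.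
import Mathlib
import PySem

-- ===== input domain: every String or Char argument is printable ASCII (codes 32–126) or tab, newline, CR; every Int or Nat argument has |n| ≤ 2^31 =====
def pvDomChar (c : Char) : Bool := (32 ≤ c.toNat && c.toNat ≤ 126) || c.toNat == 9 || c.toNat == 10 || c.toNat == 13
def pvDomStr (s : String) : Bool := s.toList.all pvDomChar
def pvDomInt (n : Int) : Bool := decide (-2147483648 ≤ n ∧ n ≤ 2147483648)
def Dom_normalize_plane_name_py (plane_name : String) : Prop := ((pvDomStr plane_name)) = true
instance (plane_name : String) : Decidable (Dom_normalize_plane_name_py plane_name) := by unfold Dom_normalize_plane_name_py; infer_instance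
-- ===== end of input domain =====

-- B replaces A's 9-entry alias table by stripping one trailing "sketchplane"/"plane" suffix and
-- checking the base against {"xy","xz","yz"} (objective: simpler).

-- ===== PORT A =====
-- "".join(character.lower() for character in plane_name if character.isalpha())
def pvNormalizedA (plane_name : String) : String :=
  String.ofList ((plane_name.toList.filter PySem.Chars.isalpha).map PySem.Chars.lowerChar)

def pvAliases : PySem.Dict String String :=
  PySem.Dict.ofList
    [("xy", "xy"), ("xyplane", "xy"), ("xysketchplane", "xy"),
     ("xz", "xz"), ("xzplane", "xz"), ("xzsketchplane", "xz"),
     ("yz", "yz"), ("yzplane", "yz"), ("yzsketchplane", "yz")]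

-- the isinstance guard is vacuous under the type convention (plane_name : String)
def normalize_plane_name_py (plane_name : String) : String :=
  pvAliases.getD (pvNormalizedA plane_name) "unknown"

-- ===== PORT B =====
-- the for-loop over ("sketchplane", "plane") with break, unrolled to its two iterations
def pvStripSuffix (base : String) : String :=
  if PySem.Str.endswith base "sketchplane" then PySem.Str.slice base none (some (-11))
  else if PySem.Str.endswith base "plane" then PySem.Str.slice base none (some (-5))
  else base

def normalize_plane_name_py_alt (plane_name : String) : String :=
  let base := String.ofList ((plane_name.toList.filter PySem.Chars.isalpha).map PySem.Chars.lowerChar)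
  let base := pvStripSuffix base
  if base ∈ (["xy", "xz", "yz"] : List String) then base else "unknown"

-- ===== PRECONDITION & SPEC =====
def Spec_normalize_plane_name_py (plane_name : String) (out : String) : Prop := out = normalize_plane_name_py_alt plane_name
instance (plane_name : String) (out : String) : Decidable (Spec_normalize_plane_name_py plane_name out) := by unfold Spec_normalize_plane_name_py; infer_instance

-- ===== CLAIM (what is proved, stated in full; the proofs are below) =====
def Claim_equal_normalize_plane_name_py : Prop := ∀ (plane_name : String), Dom_normalize_plane_name_py plane_name → Spec_normalize_plane_name_py plane_name (normalize_plane_name_py plane_name)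

-- ===== LEMMAS AND PROOFS =====

def pvKeys : List String :=
  ["xy", "xyplane", "xysketchplane", "xz", "xzplane", "xzsketchplane",
   "yz", "yzplane", "yzsketchplane"]

-- splitting invariant of the suffix strip: the stripped suffix really was a suffix
theorem pv_toList_strip (s : String) :
    s.toList = (pvStripSuffix s).toList ++
      (if PySem.Str.endswith s "sketchplane" then "sketchplane".toList
       else if PySem.Str.endswith s "plane" then "plane".toList else []) := by
  unfold pvStripSuffix
  split_ifs with h1 h2
  · obtain ⟨t, ht⟩ := (PySem.Chars.endswith_iff _ _).mp (by simpa using h1)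
    have h11 : ("sketchplane".toList).length = 11 := by decide
    rw [PySem.Str.toList_slice, PySem.Chars.slice_eq_listSlice,
        PySem.List.slice_to_neg_ofNat _ 11 (by omega), ← ht]
    simp [List.length_append]
  · obtain ⟨t, ht⟩ := (PySem.Chars.endswith_iff _ _).mp (by simpa using h2)
    have h5 : ("plane".toList).length = 5 := by decide
    rw [PySem.Str.toList_slice, PySem.Chars.slice_eq_listSlice,
        PySem.List.slice_to_neg_ofNat _ 5 (by omega), ← ht]
    simp [List.length_append]
  · simp

-- core equivalence: table lookup = strip-suffix-then-membership, for any string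
theorem pv_core (s : String) :
    pvAliases.getD s "unknown" =
      (if pvStripSuffix s ∈ (["xy", "xz", "yz"] : List String) then pvStripSuffix s else "unknown") := by
  by_cases hk : s ∈ pvKeys
  · fin_cases hk <;> decide
  · have hB : pvStripSuffix s ∉ (["xy", "xz", "yz"] : List String) := by
      intro hmem
      apply hk
      have hsplit := pv_toList_strip s
      simp only [List.mem_cons, List.not_mem_nil, or_false] at hmem
      rcases hmem with h | h | h <;> rw [h] at hsplit <;> split_ifs at hsplit <;>
        · rw [← @String.ofList_toList s, hsplit]; decide
    have hne : ∀ k ∈ pvKeys, ¬ (k = s) := fun k hkk he => hk (he ▸ hkk)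
    simp only [pvKeys, List.mem_cons, List.not_mem_nil, or_false, forall_eq_or_imp, forall_eq] at hne
    obtain ⟨h1, h2, h3, h4, h5, h6, h7, h8, h9⟩ := hne
    rw [if_neg hB]
    have hd : pvAliases = PySem.Dict.mk
        [("xy", "xy"), ("xyplane", "xy"), ("xysketchplane", "xy"),
         ("xz", "xz"), ("xzplane", "xz"), ("xzsketchplane", "xz"),
         ("yz", "yz"), ("yzplane", "yz"), ("yzsketchplane", "yz")] := by decide
    rw [hd, PySem.Dict.getD_eq_get?_getD]
    simp [beq_iff_eq, h1, h2, h3, h4, h5, h6, h7, h8, h9,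
          PySem.Dict.get?]

theorem normalize_plane_name_py_spec : Claim_equal_normalize_plane_name_py := by
  intro s _
  show normalize_plane_name_py s = normalize_plane_name_py_alt s
  unfold normalize_plane_name_py normalize_plane_name_py_alt pvNormalizedA
  exact pv_core _
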